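-- pv_equiv track=rewrite | github.com/StammetC/BuchiAutomata_for_GNN | BA_forGNN_Generator.py | non_emptyness_check
-- ===== SOURCE A (Python) =====
-- from typing import Tuple
--
-- def get_minimal_distance(edge_in: list, edge_out: list, s1: int, s2: int) -> int:
--     """
--     Takes as input two lists describing the edge relations of an automaton (using the conventions used
--     by the torch_geometric.data.Data class and returns the minimal distance between
--     the two given nodes s1 and s2 using a breath first search algorithm.
--     -1 is returned as a distance if s1 and s2 are not connected.
--
--     :param edge_in: first list from 'edge_index' tensor from the torch_geometric.data.Data class
--     :param edge_out: second list from 'edge_index' tensor from the torch_geometric.data.Data class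
--     :param s1: integer number of a node in edge list (start of searched path)
--     :param s2: integer number of a node in edge list (goal of searched path)
--     :return: integer denoting the minimal distance between nodes s1 and s2 ('-1' if s1 and s2 are not connected)
--     """
--     dist = 1
--     done = []
--     # dist_hop denotes the list of all nodes that are 'dist' away from s1
--     dist_hop = [s1]
--     # distplusone_hop is the list of all nodes that are 'dist'+1 away from s1
--     distplusone_hop = []
--     # a safety measure while loop - distance cannot be longer than the total number of edges
--     while dist <= len(edge_in):
--         for s in dist_hop:
--             done.append(s)
--             # computes the list of all direct successors of s
--             occurrences = lambda s, lst: (i for i, e in enumerate(lst) if e == s)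
--             all_succ = set([edge_out[i] for i in occurrences(s, edge_in)])
--             # check for each successor if it 1) is the goal state s2 or 2) has already been treated by the algorithm
--             for succ in all_succ:
--                 if succ == s2:
--                     return dist
--                 elif not (succ in done) and not (succ in distplusone_hop):
--                     distplusone_hop.append(succ)
--         # jumping one step forward - next run of the while loop, all treated states' distance increases by 1
--         dist += 1
--         dist_hop = distplusone_hop
--         distplusone_hop = []
--     return -1
--
-- def non_emptyness_check(edge_in: list, edge_out: list, acc: list, start: int = 0,
--                         mode: str = 'from_start') -> Tuple[bool, str]:
--     """
--     Takes as input two lists describing the edge relations of an automaton (using the conventions used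
--     by the torch_geometric.data.Data class and the set of accepting states and returns whether the given
--     automaton structure is empty or not, i.e. if an accepting state can be reached from the initial state.
--     The parameters start and mode are used for a recursive call of the function (do not give as input outside
--     of this function). \n
--     The string describing the type of emptyness is as follows: \n
--     - "non-empty" if the automaton is non empty, i.e. it accepts at least one omega-word \n
--     If the automaton is empty, i.e. no omega-word is accepted, the following types are distinguished: \n
--     - "no_acc_state": The automaton does not contain an accepting state \n
--     - "no_acc_reached": No accepting state is reachable \n
--     - "no_acc_selfreached": No reachable accepting state is self-reachable
--
--     :param edge_in: first list from 'edge_index' tensor from the torch_geometric.data.Data class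
--     :param edge_out: second list from 'edge_index' tensor from the torch_geometric.data.Data class
--     :param acc: set of integers denoting the accepting states of the automaton
--     :param start: variable needed for recursive function call
--     :param mode: variable needed for recursive function call
--     :return: boolean denoting non-emptyness of the given automaton and a string describing the type of emptyness
--     """
--     if len(acc) == 0:
--         return False, 'no_acc_state'
--     todo = [start]
--     reachable_acc = []
--     done = []
--     acc_has_been_reached = False
--     while not (len(todo) == 0):
--         active_state = todo.pop(0)
--         done.append(active_state)
--         # get list of all successors of active_state
--         occurrences = lambda s, lst: (i for i, e in enumerate(lst) if e == s)
--         all_succ = set([edge_out[i] for i in occurrences(active_state, edge_in)])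
--         for s in all_succ:
--             if not (s in done):
--                 todo.append(s)
--             if (s in acc) and not (s in reachable_acc):
--                 reachable_acc.append(s)
--     if (mode == 'from_acc') and (len(reachable_acc) > 0):
--         return True, 'non_empty'
--     for s in reachable_acc:
--         acc_has_been_reached = True
--         dist_from_start = get_minimal_distance(edge_in, edge_out, start, s)
--         can_s_reach_itself, type = non_emptyness_check(edge_in, edge_out, [s], start=s, mode='from_acc')
--         if can_s_reach_itself:
--             return True, 'non_empty'
--     if not acc_has_been_reached:
--         return False, 'no_acc_reached'
--     else:
--         return False, 'no_acc_selfreached'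
-- ===== SOURCE B (Python) =====
-- def non_emptyness_check(edge_in: list, edge_out: list, acc: list, start: int = 0,
--                         mode: str = 'from_start'):
--     if len(acc) == 0:
--         return False, 'no_acc_state'
--     # adjacency map built once: no repeated scans of edge_in
--     adj = {}
--     for u, v in zip(edge_in, edge_out):
--         adj.setdefault(u, []).append(v)
--
--     def reach1(src):
--         # set of nodes reachable from src in at least one step (level BFS)
--         seen = []
--         seen_set = set()
--         frontier = [src]
--         while frontier:
--             nxt = []
--             for u in frontier:
--                 for v in adj.get(u, ()):
--                     if v not in seen_set:
--                         seen_set.add(v)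
--                         seen.append(v)
--                         nxt.append(v)
--             frontier = nxt
--         return seen
--
--     acc_set = set(acc)
--     reachable_acc = [s for s in reach1(start) if s in acc_set]
--     if mode == 'from_acc' and reachable_acc:
--         return True, 'non_empty'
--     if not reachable_acc:
--         return False, 'no_acc_reached'
--     if any(s in reach1(s) for s in reachable_acc):
--         return True, 'non_empty'
--     return False, 'no_acc_selfreached'
-- ===== Notes on version B (the rewrite author's own statement) =====
-- stated objective: alternative
-- what changed: B builds an adjacency dict once and runs a seen-set level BFS plus a direct per-accepting-state cycle test, replacing A's BFS that rescans edge_in for every processed state, its unused get_minimal_distance call and its recursive self-call with mode='from_acc'.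
import Mathlib
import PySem

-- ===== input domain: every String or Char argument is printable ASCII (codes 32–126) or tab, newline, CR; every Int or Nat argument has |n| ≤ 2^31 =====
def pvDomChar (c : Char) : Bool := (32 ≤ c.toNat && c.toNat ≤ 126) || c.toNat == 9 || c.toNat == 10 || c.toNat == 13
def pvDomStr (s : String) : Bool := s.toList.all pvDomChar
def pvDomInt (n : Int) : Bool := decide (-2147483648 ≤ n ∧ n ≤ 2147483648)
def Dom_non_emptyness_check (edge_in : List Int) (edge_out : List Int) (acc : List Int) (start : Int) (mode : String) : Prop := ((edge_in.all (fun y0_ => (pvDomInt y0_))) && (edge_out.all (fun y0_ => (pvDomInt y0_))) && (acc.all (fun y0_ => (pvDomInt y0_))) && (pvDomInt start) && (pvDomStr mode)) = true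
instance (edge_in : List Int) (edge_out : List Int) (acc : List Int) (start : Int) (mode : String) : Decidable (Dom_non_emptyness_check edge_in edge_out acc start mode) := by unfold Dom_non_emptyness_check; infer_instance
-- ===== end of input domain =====

-- B replaces A's per-state rescans of edge_in, its recursive self-call and its unused
-- distance computation by a single adjacency dictionary, a level BFS and a direct
-- per-accepting-state cycle test; equivalence is proved on Pre_ (exactly the inputs where A
-- returns instead of raising IndexError — see the comment at Pre_).

-- ===== PORT A =====
-- all_succ = set([edge_out[i] for i, e in enumerate(edge_in) if e == u]); Python raises
-- IndexError when i ≥ len(edge_out) — those inputs are excluded by Pre_, the port uses getD _ 0 there.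
def succA (ei eo : List Int) (u : Int) : List Int :=
  PySem.List.dedup ((PySem.List.enumerate ei 0).filterMap
    (fun p => if p.2 = u then some (eo.getD p.1.toNat 0) else none))

-- get_minimal_distance: inner 'for succ in all_succ' (early return = none)
def gmdFor2 (s2 : Int) (done : List Int) : List Int → List Int → Option (List Int)
  | [], dpo => some dpo
  | c :: rest, dpo =>
    if c = s2 then none
    else if c ∉ done ∧ c ∉ dpo then gmdFor2 s2 done rest (dpo ++ [c])
    else gmdFor2 s2 done rest dpo

-- get_minimal_distance: 'for s in dist_hop'
def gmdFor1 (ei eo : List Int) (s2 : Int) : List Int → List Int → List Int → Option (List Int × List Int)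
  | [], done, dpo => some (done, dpo)
  | s :: rest, done, dpo =>
    match gmdFor2 s2 (done ++ [s]) (succA ei eo s) dpo with
    | none => none
    | some dpo' => gmdFor1 ei eo s2 rest (done ++ [s]) dpo'

-- get_minimal_distance: 'while dist <= len(edge_in)' (dist runs 1..len(edge_in), so the
-- fuel ei.length performs exactly the iterations the Python loop performs)
def gmdWhile (ei eo : List Int) (s2 : Int) : Nat → Int → List Int → List Int → Int
  | 0, _, _, _ => -1
  | fuel+1, dist, done, dist_hop =>
    match gmdFor1 ei eo s2 dist_hop done [] with
    | none => dist
    | some (done', dpo') => gmdWhile ei eo s2 fuel (dist+1) done' dpo'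

def get_minimal_distance (ei eo : List Int) (s1 s2 : Int) : Int :=
  gmdWhile ei eo s2 ei.length 1 [] [s1]

-- invariant carried by A's BFS loop, needed only for its termination proof
def InvA (ei eo : List Int) (s0 : Int) (todo done : List Int) : Prop :=
  (∀ v ∈ done, ∀ s ∈ succA ei eo v, s ∈ done ∨ s ∈ todo) ∧ (∀ x ∈ todo, x ∈ s0 :: (0:Int) :: eo)

lemma succA_range (ei eo : List Int) (u x : Int) (hx : x ∈ succA ei eo u) : x ∈ (0:Int) :: eo := by
  simp only [succA, PySem.List.mem_dedup, List.mem_filterMap] at hx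
  obtain ⟨p, hp, hf⟩ := hx
  by_cases hpu : p.2 = u
  · rw [if_pos hpu, Option.some.injEq] at hf
    subst hf
    by_cases h : p.1.toNat < eo.length
    · rw [List.getD_eq_getElem eo 0 h]
      exact List.mem_cons_of_mem _ (List.getElem_mem h)
    · rw [List.getD_eq_default eo 0 (by omega)]
      exact List.mem_cons_self
  · rw [if_neg hpu] at hf; exact absurd hf (by simp)

-- the body of A's 'for s in all_succ' loop: append to todo if not done, to reachable_acc if accepting and new
def astep (done' accl : List Int) (st : List Int × List Int) (s : Int) : List Int × List Int :=
  (if s ∉ done' then st.1 ++ [s] else st.1,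
   if s ∈ accl ∧ s ∉ st.2 then st.2 ++ [s] else st.2)

-- the 'for s in all_succ' body of A's while loop, first component (todo)
lemma foldA_fst (done' accl : List Int) (succ : List Int) (t0 r0 : List Int) :
    (succ.foldl (astep done' accl) (t0, r0)).1
    = t0 ++ succ.filter (fun s => decide (s ∉ done')) := by
  induction succ generalizing t0 r0 with
  | nil => simp
  | cons a l ih =>
    simp only [List.foldl_cons, astep]
    rw [ih]
    by_cases h : a ∈ done' <;> simp [h, List.filter_cons]

lemma invA_init (ei eo : List Int) (s0 : Int) : InvA ei eo s0 [s0] [] := by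
  constructor
  · intro v hv; simp at hv
  · intro x hx; simp at hx; simp [hx]

lemma invA_step (ei eo : List Int) (s0 u : Int) (rest done : List Int)
    (h : InvA ei eo s0 (u :: rest) done) :
    InvA ei eo s0 (rest ++ (succA ei eo u).filter (fun s => decide (s ∉ done ++ [u]))) (done ++ [u]) := by
  obtain ⟨h1, h2⟩ := h
  constructor
  · intro v hv s hs
    rw [List.mem_append] at hv
    rcases hv with hv | hv
    · rcases h1 v hv s hs with hd | ht
      · exact Or.inl (List.mem_append_left _ hd)
      · rw [List.mem_cons] at ht
        rcases ht with rfl | ht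
        · exact Or.inl (List.mem_append_right _ List.mem_cons_self)
        · exact Or.inr (List.mem_append_left _ ht)
    · rw [List.mem_singleton] at hv
      by_cases hsd : s ∈ done ++ [u]
      · exact Or.inl hsd
      · exact Or.inr (List.mem_append_right _ (List.mem_filter.mpr ⟨hv ▸ hs, by simpa using hsd⟩))
  · intro x hx
    rw [List.mem_append] at hx
    rcases hx with hx | hx
    · exact h2 x (List.mem_cons_of_mem _ hx)
    · have hxs : x ∈ succA ei eo u := (List.mem_filter.mp hx).1
      have := succA_range ei eo u x hxs
      rw [List.mem_cons] at this
      rcases this with rfl | hmem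
      · exact List.mem_cons_of_mem _ List.mem_cons_self
      · exact List.mem_cons_of_mem _ (List.mem_cons_of_mem _ hmem)

lemma loopA_dec_fresh (ei eo : List Int) (s0 u : Int) (rest done : List Int)
    (h : InvA ei eo s0 (u :: rest) done) (hu : u ∉ done) :
    (((s0 :: (0:Int) :: eo).toFinset \ (done ++ [u]).toFinset).card)
      < (((s0 :: (0:Int) :: eo).toFinset \ done.toFinset).card) := by
  have hU : u ∈ (s0 :: (0:Int) :: eo).toFinset :=
    List.mem_toFinset.mpr (h.2 u List.mem_cons_self)
  have heq : (done ++ [u]).toFinset = insert u done.toFinset := by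
    simp [List.toFinset_append, Finset.union_comm]
  rw [heq, Finset.sdiff_insert]
  exact Finset.card_erase_lt_of_mem (Finset.mem_sdiff.mpr ⟨hU, by simpa using hu⟩)

lemma loopA_dec_stale (ei eo : List Int) (s0 u : Int) (rest done : List Int)
    (h : InvA ei eo s0 (u :: rest) done) (hu : u ∈ done) :
    ((rest ++ (succA ei eo u).filter (fun s => decide (s ∉ done ++ [u]))).findIdx
        (fun s => !(done ++ [u]).contains s))
      < ((u :: rest).findIdx (fun s => !done.contains s)) ∧
    (((s0 :: (0:Int) :: eo).toFinset \ (done ++ [u]).toFinset).card)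
      = (((s0 :: (0:Int) :: eo).toFinset \ done.toFinset).card) := by
  have heqf : (done ++ [u]).toFinset = done.toFinset := by
    simp [List.toFinset_append, Finset.union_comm, Finset.insert_eq_self.mpr (List.mem_toFinset.mpr hu)]
  have hpred : (fun s => !(done ++ [u]).contains s) = (fun s => !done.contains s) := by
    funext s
    by_cases hs : s ∈ done
    · simp [hs]
    · by_cases hsu : s = u
      · subst hsu; simp [hu, hs]
      · simp [hs, hsu]
  constructor
  · rw [hpred]
    have hcu : (!done.contains u) = false := by simp [hu]
    rw [List.findIdx_cons, hcu]
    simp only [cond_false]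
    by_cases hrest : ∃ x ∈ rest, (!done.contains x) = true
    · rw [List.findIdx_append]
      have hlt : rest.findIdx (fun s => !done.contains s) < rest.length := by
        obtain ⟨x, hxl, hxp⟩ := hrest
        exact List.findIdx_lt_length_of_exists ⟨x, hxl, hxp⟩
      rw [if_pos hlt]; omega
    · push_neg at hrest
      have happ : (succA ei eo u).filter (fun s => decide (s ∉ done ++ [u])) = [] := by
        rw [List.filter_eq_nil_iff]
        intro s hs hflt
        have hnd : s ∉ done ++ [u] := by simpa using hflt
        rcases h.1 u hu s hs with hd | ht
        · exact hnd (List.mem_append_left _ hd)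
        · rw [List.mem_cons] at ht
          rcases ht with rfl | ht
          · exact hnd (List.mem_append_right _ List.mem_cons_self)
          · have := hrest s ht
            have hsd : s ∈ done := by
              by_contra hsd
              simp [hsd] at this
            exact hnd (List.mem_append_left _ hsd)
      rw [happ, List.append_nil]
      have hidx : rest.findIdx (fun s => !done.contains s) = rest.length :=
        List.findIdx_eq_length.mpr (by
          intro x hxl
          have := hrest x hxl
          simpa using this)
      omega
  · rw [heqf]

-- A's BFS while-loop: todo.pop(0); done.append; for s in all_succ: … (returns reachable_acc)
def loopA (ei eo accl : List Int) (s0 : Int) (todo done racc : List Int)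
    (h : InvA ei eo s0 todo done) : List Int :=
  match todo, h with
  | [], _ => racc
  | u :: rest, h =>
    let done' := done ++ [u]
    let st := (succA ei eo u).foldl (astep done' accl) (rest, racc)
    loopA ei eo accl s0 st.1 done' st.2
      (by
        have hst : st.1 = rest ++ (succA ei eo u).filter (fun s => decide (s ∉ done')) :=
          foldA_fst done' accl (succA ei eo u) rest racc
        rw [hst]; exact invA_step ei eo s0 u rest done h)
termination_by (((s0 :: (0:Int) :: eo).toFinset \ done.toFinset).card,
    todo.findIdx (fun s => !done.contains s))
decreasing_by
  rw [foldA_fst]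
  by_cases hu : u ∈ done
  · have hd := loopA_dec_stale ei eo s0 u rest done h hu
    rw [Prod.lex_iff]
    exact Or.inr ⟨hd.2, hd.1⟩
  · exact Prod.Lex.left _ _ (loopA_dec_fresh ei eo s0 u rest done h hu)

-- the recursive call non_emptyness_check(…, [s], s, 'from_acc') has recursion depth ≤ 1 in
-- Python (in 'from_acc' mode the function returns before its loop whenever reachable_acc ≠ []),
-- so the mutual ports below are Python-exact for any fuel ≥ 2; the top entry uses fuel 2.
mutual
def necAux : Nat → List Int → List Int → List Int → Int → String → Bool × String
  | 0, _, _, _, _, _ => (false, "")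
  | fuel+1, ei, eo, accl, start, mode =>
    if accl.length = 0 then (false, "no_acc_state")
    else
      let racc := loopA ei eo accl start [start] [] [] (invA_init ei eo start)
      if mode = "from_acc" ∧ 0 < racc.length then (true, "non_empty")
      else necFor fuel ei eo start racc false
termination_by fuel => (fuel, 0)

-- the 'for s in reachable_acc' loop; the flag is acc_has_been_reached
def necFor : Nat → List Int → List Int → Int → List Int → Bool → Bool × String
  | _, _, _, _, [], reached =>
    if !reached then (false, "no_acc_reached") else (false, "no_acc_selfreached")
  | fuel, ei, eo, start, s :: rest, _ =>
    let _dist := get_minimal_distance ei eo start s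
    let r := necAux fuel ei eo [s] s "from_acc"
    if r.1 then (true, "non_empty") else necFor fuel ei eo start rest true
termination_by fuel _ _ _ racc _ => (fuel, racc.length + 1)
end

def non_emptyness_check (edge_in : List Int) (edge_out : List Int) (acc : List Int) (start : Int) (mode : String) : Bool × String :=
  necAux 2 edge_in edge_out acc start mode

-- ===== PORT B =====
-- adjacency dict of Source B: adj.setdefault(u, []).append(v) over zip(edge_in, edge_out)
def adjB (ei eo : List Int) : PySem.Dict Int (List Int) :=
  (ei.zip eo).foldl (fun d p => d.modify p.1 [] (fun l => l ++ [p.2])) PySem.Dict.empty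

-- inner and outer folds of Source B's frontier expansion, named for the termination
-- and correctness lemmas (definitionally the folds appearing in loopB)
def binner (xs : List Int) (q : List Int × List Int) : List Int × List Int :=
  xs.foldl (fun q v => if v ∈ q.1 then q else (q.1 ++ [v], q.2 ++ [v])) q

def bouter (adj : PySem.Dict Int (List Int)) (frontier : List Int) (q : List Int × List Int) : List Int × List Int :=
  frontier.foldl (fun q u => binner (adj.getD u []) q) q

lemma binner_spec (s0 : List Int) : ∀ (xs : List Int) (q : List Int × List Int),
    q.1 = s0 ++ q.2 → q.2.Nodup →
    (binner xs q).1 = s0 ++ (binner xs q).2 ∧ (binner xs q).2.Nodup ∧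
    (∀ x, x ∈ (binner xs q).2 ↔ x ∈ q.2 ∨ (x ∈ xs ∧ x ∉ q.1)) := by
  intro xs
  induction xs with
  | nil => intro q hq hnd; refine ⟨hq, hnd, ?_⟩; simp [binner]
  | cons a l ih =>
    intro q hq hnd
    by_cases ha : a ∈ q.1
    · have hstep : binner (a :: l) q = binner l q := by simp [binner, ha]
      rw [hstep]
      obtain ⟨c1, c2, c3⟩ := ih q hq hnd
      refine ⟨c1, c2, ?_⟩
      intro x
      rw [c3 x]
      constructor
      · rintro (hx | ⟨hx, hnq⟩) <;> [tauto; exact Or.inr ⟨List.mem_cons_of_mem _ hx, hnq⟩]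
      · rintro (hx | ⟨hx, hnq⟩)
        · tauto
        · rw [List.mem_cons] at hx
          rcases hx with rfl | hx
          · exact absurd ha hnq
          · tauto
    · have hstep : binner (a :: l) q = binner l (q.1 ++ [a], q.2 ++ [a]) := by
        simp [binner, ha]
      rw [hstep]
      have hq' : (q.1 ++ [a], q.2 ++ [a]).1 = s0 ++ (q.1 ++ [a], q.2 ++ [a]).2 := by
        simp [hq]
      have hnd' : (q.1 ++ [a], q.2 ++ [a]).2.Nodup := by
        have hna : a ∉ q.2 := fun hc => ha (hq ▸ List.mem_append_right _ hc)
        simp [List.nodup_append, hnd]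
        intro y hy hya
        exact hna (hya ▸ hy)
      obtain ⟨c1, c2, c3⟩ := ih _ hq' hnd'
      refine ⟨c1, c2, ?_⟩
      intro x
      rw [c3 x]
      simp only [List.mem_append, List.mem_singleton, List.mem_cons, List.not_mem_nil, or_false]
      constructor
      · rintro ((hx | rfl) | ⟨hx, hnq⟩)
        · tauto
        · exact Or.inr ⟨Or.inl rfl, ha⟩
        · exact Or.inr ⟨Or.inr hx, fun hc => hnq (Or.inl hc)⟩
      · rintro (hx | ⟨(rfl | hx), hnq⟩)
        · tauto
        · exact Or.inl (Or.inr rfl)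
        · by_cases hxa : x = a
          · exact Or.inl (Or.inr hxa)
          · exact Or.inr ⟨hx, by simp [hnq, hxa]⟩

lemma bouter_spec (adj : PySem.Dict Int (List Int)) (s0 : List Int) :
    ∀ (frontier : List Int) (q : List Int × List Int),
    q.1 = s0 ++ q.2 → q.2.Nodup →
    (bouter adj frontier q).1 = s0 ++ (bouter adj frontier q).2 ∧
    (bouter adj frontier q).2.Nodup ∧
    (∀ x, x ∈ (bouter adj frontier q).2 ↔ x ∈ q.2 ∨ (∃ u ∈ frontier, x ∈ adj.getD u [] ∧ x ∉ q.1)) := by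
  intro frontier
  induction frontier with
  | nil => intro q hq hnd; refine ⟨hq, hnd, ?_⟩; simp [bouter]
  | cons a rest ih =>
    intro q hq hnd
    have hstep : bouter adj (a :: rest) q = bouter adj rest (binner (adj.getD a []) q) := by
      simp [bouter]
    obtain ⟨b1, b2, b3⟩ := binner_spec s0 (adj.getD a []) q hq hnd
    obtain ⟨c1, c2, c3⟩ := ih _ b1 b2
    rw [hstep]
    refine ⟨c1, c2, ?_⟩
    intro x
    rw [c3 x]
    have hmem1 : ∀ y, y ∈ (binner (adj.getD a []) q).1 ↔ y ∈ s0 ∨ y ∈ (binner (adj.getD a []) q).2 := by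
      intro y; rw [b1]; simp
    have hmemq : ∀ y, y ∈ q.1 ↔ y ∈ s0 ∨ y ∈ q.2 := by
      intro y; rw [hq]; simp
    constructor
    · rintro (hx | ⟨u, hu, hxu, hnq⟩)
      · rw [b3 x] at hx
        rcases hx with hx | ⟨hx, hnq⟩
        · tauto
        · exact Or.inr ⟨a, List.mem_cons_self, hx, hnq⟩
      · have hnq' : x ∉ q.1 := fun hc => hnq ((hmem1 x).mpr (Or.elim ((hmemq x).mp hc) Or.inl (fun h2 => Or.inr ((b3 x).mpr (Or.inl h2)))))
        exact Or.inr ⟨u, List.mem_cons_of_mem _ hu, hxu, hnq'⟩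
    · rintro (hx | ⟨u, hu, hxu, hnq⟩)
      · exact Or.inl ((b3 x).mpr (Or.inl hx))
      · rw [List.mem_cons] at hu
        rcases hu with rfl | hu
        · exact Or.inl ((b3 x).mpr (Or.inr ⟨hxu, hnq⟩))
        · by_cases hx1 : x ∈ (binner (adj.getD a []) q).1
          · rcases (hmem1 x).mp hx1 with hs | h2
            · exact absurd ((hmemq x).mpr (Or.inl hs)) hnq
            · exact Or.inl h2
          · exact Or.inr ⟨u, hu, hxu, fun hc => hx1 hc⟩

lemma mem_getD_flatten (adj : PySem.Dict Int (List Int)) (u v : Int)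
    (h : v ∈ adj.getD u []) : v ∈ adj.values.flatten := by
  rcases hg : adj.get? u with _ | l
  · rw [PySem.Dict.getD_eq_get?_getD, hg] at h; simp at h
  · have hl : l ∈ adj.values := by
      have hit := PySem.Dict.mem_items_of_get?_eq_some (d := adj) (k := u) (v := l) hg
      exact List.mem_map.mpr ⟨(u, l), hit, rfl⟩
    rw [PySem.Dict.getD_eq_get?_getD, hg] at h
    exact List.mem_flatten.mpr ⟨l, hl, by simpa using h⟩

lemma loopB_dec (adj : PySem.Dict Int (List Int)) (frontier seen : List Int)
    (hne : ¬frontier = []) :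
    ((adj.values.flatten.toFinset \ (bouter adj frontier (seen, [])).1.toFinset).card) * 2
      + (bouter adj frontier (seen, [])).2.length
    < ((adj.values.flatten.toFinset \ seen.toFinset).card) * 2 + frontier.length := by
  obtain ⟨c1, c2, c3⟩ := bouter_spec adj seen frontier (seen, []) (by simp) (by simp)
  have hsub : (bouter adj frontier (seen, [])).2.toFinset ⊆
      adj.values.flatten.toFinset \ seen.toFinset := by
    intro x hx
    rw [List.mem_toFinset] at hx
    rcases (c3 x).mp hx with hx0 | ⟨u, _, hxu, hxs⟩
    · simp at hx0
    · exact Finset.mem_sdiff.mpr ⟨List.mem_toFinset.mpr (mem_getD_flatten adj u x hxu),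
        fun hc => hxs (List.mem_toFinset.mp hc)⟩
  have e0 : (bouter adj frontier (seen, [])).1.toFinset
      = seen.toFinset ∪ (bouter adj frontier (seen, [])).2.toFinset := by
    rw [c1]; exact List.toFinset_append
  have e1 : adj.values.flatten.toFinset \ (bouter adj frontier (seen, [])).1.toFinset
      = (adj.values.flatten.toFinset \ seen.toFinset) \ (bouter adj frontier (seen, [])).2.toFinset := by
    rw [e0, sdiff_sdiff]; rfl
  have e2 : ((adj.values.flatten.toFinset \ seen.toFinset) \ (bouter adj frontier (seen, [])).2.toFinset).card
      = (adj.values.flatten.toFinset \ seen.toFinset).card - (bouter adj frontier (seen, [])).2.length := by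
    rw [Finset.card_sdiff, Finset.inter_eq_left.mpr hsub, List.toFinset_card_of_nodup c2]
  have e3 : (bouter adj frontier (seen, [])).2.length ≤ (adj.values.flatten.toFinset \ seen.toFinset).card := by
    calc (bouter adj frontier (seen, [])).2.length
        = (bouter adj frontier (seen, [])).2.toFinset.card := (List.toFinset_card_of_nodup c2).symm
      _ ≤ _ := Finset.card_le_card hsub
  have e4 : 0 < frontier.length := List.length_pos_iff.mpr hne
  rw [e1, e2]
  omega

-- Source B's reach1: level BFS; one call = one whole-frontier expansion
def loopB (adj : PySem.Dict Int (List Int)) (frontier seen : List Int) : List Int :=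
  if hne : frontier = [] then seen
  else
    let p := bouter adj frontier (seen, [])
    loopB adj p.2 p.1
termination_by ((adj.values.flatten.toFinset \ seen.toFinset).card) * 2 + frontier.length
decreasing_by
  exact loopB_dec adj frontier seen hne

def non_emptyness_check_alt (edge_in : List Int) (edge_out : List Int) (acc : List Int) (start : Int) (mode : String) : Bool × String :=
  if acc.length = 0 then (false, "no_acc_state")
  else
    let adj := adjB edge_in edge_out
    let accset := PySem.Set.ofList acc
    let reachable_acc := (loopB adj [start] []).filter (fun s => PySem.Set.contains accset s)
    if mode = "from_acc" ∧ reachable_acc ≠ [] then (true, "non_empty")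
    else if reachable_acc = [] then (false, "no_acc_reached")
    else if reachable_acc.any (fun s => (loopB adj [s] []).contains s) then (true, "non_empty")
    else (false, "no_acc_selfreached")

-- ===== PRECONDITION & SPEC =====
-- Helpers for Pre_ only (independent of both ports): transitive closure of the edge
-- relation by saturating a list of nodes against the edge list until nothing is added.
def pvSatStep (edges : List (Int × Int)) (S : List Int) : List Int :=
  edges.foldl (fun S p => if p.1 ∈ S ∧ p.2 ∉ S then S ++ [p.2] else S) S

def pvIter (edges : List (Int × Int)) : Nat → List Int → List Int
  | 0, S => S
  | n+1, S => if pvSatStep edges S = S then S else pvIter edges n (pvSatStep edges S)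

-- nodes reachable from S along edges (each round adds a new edge target, so
-- card of the target set + 1 rounds always reach the fixpoint)
def pvReach (edges : List (Int × Int)) (S : List Int) : List Int :=
  pvIter edges ((edges.map Prod.snd).toFinset.card + 1) S

-- A raises IndexError exactly when acc is non-empty and some state occurring in edge_in at
-- an index ≥ len(edge_out) is reachable from start (along the in-range edges); Pre_ excludes
-- exactly those inputs and admits every input on which A returns.
def Pre_non_emptyness_check (edge_in : List Int) (edge_out : List Int) (acc : List Int) (start : Int) (mode : String) : Prop :=
  acc = [] ∨ ∀ b ∈ edge_in.drop edge_out.length, b ∉ pvReach (edge_in.zip edge_out) [start]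
instance (edge_in : List Int) (edge_out : List Int) (acc : List Int) (start : Int) (mode : String) : Decidable (Pre_non_emptyness_check edge_in edge_out acc start mode) := by unfold Pre_non_emptyness_check; infer_instance

def pvWitness_non_emptyness_check : List Int × List Int × List Int × Int × String :=
  ([0, 1], [1, 0], [1], 0, "from_start")

def Spec_non_emptyness_check (edge_in : List Int) (edge_out : List Int) (acc : List Int) (start : Int) (mode : String) (out : Bool × String) : Prop := out = non_emptyness_check_alt edge_in edge_out acc start mode
instance (edge_in : List Int) (edge_out : List Int) (acc : List Int) (start : Int) (mode : String) (out : Bool × String) : Decidable (Spec_non_emptyness_check edge_in edge_out acc start mode out) := by unfold Spec_non_emptyness_check; infer_instance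

-- ===== CLAIM (what is proved, stated in full; the proofs are below) =====
def Claim_equal_non_emptyness_check : Prop := ∀ (edge_in : List Int) (edge_out : List Int) (acc : List Int) (start : Int) (mode : String), Dom_non_emptyness_check edge_in edge_out acc start mode → Pre_non_emptyness_check edge_in edge_out acc start mode → Spec_non_emptyness_check edge_in edge_out acc start mode (non_emptyness_check edge_in edge_out acc start mode)

-- ===== LEMMAS AND PROOFS =====

lemma foldA_snd_mem (done' accl : List Int) (succ : List Int) (t0 r0 : List Int) (x : Int) :
    (x ∈ (succ.foldl (astep done' accl) (t0, r0)).2)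
    ↔ (x ∈ r0 ∨ (x ∈ succ ∧ x ∈ accl)) := by
  induction succ generalizing t0 r0 with
  | nil => simp
  | cons a l ih =>
    simp only [List.foldl_cons, astep]
    rw [ih]
    simp only [List.mem_cons]
    by_cases h2 : a ∈ accl ∧ a ∉ r0
    · rw [if_pos h2]
      simp only [List.mem_append, List.mem_singleton]
      constructor
      · rintro ((hx | rfl) | hx) <;> tauto
      · rintro (hx | ⟨(rfl | hx), hacc⟩) <;>
          first
          | tauto
          | (by_cases hr : x ∈ r0 <;> tauto)
    · rw [if_neg h2]
      push_neg at h2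
      constructor
      · tauto
      · rintro (hx | ⟨(rfl | hx), hacc⟩) <;> first | tauto | exact Or.inl (h2 hacc)

-- reachability along a successor function; `ReachS succ a b` = b reachable from a in ≥ 0 steps
def ReachS (succ : Int → List Int) (a b : Int) : Prop :=
  Relation.ReflTransGen (fun x y => y ∈ succ x) a b

lemma done_closed (succ : Int → List Int) (done : List Int)
    (hcl : ∀ v ∈ done, ∀ s ∈ succ v, s ∈ done) (u w : Int)
    (h : ReachS succ u w) (hu : u ∈ done) : w ∈ done := by
  induction h with
  | refl => exact hu
  | tail _ hstep ih => exact hcl _ ih _ hstep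

-- what A's BFS loop computes, by functional induction over loopA
theorem loopA_mem (ei eo accl : List Int) (s0 : Int) (x : Int) :
    ∀ (todo done racc : List Int) (h : InvA ei eo s0 todo done),
    (∀ v ∈ done, ∀ s ∈ succA ei eo v, (s ∈ done ∨ s ∈ todo) ∧ (s ∈ accl → s ∈ racc)) →
    (x ∈ loopA ei eo accl s0 todo done racc h ↔
      x ∈ racc ∨ (x ∈ accl ∧ ∃ u w, (u ∈ todo ∨ u ∈ done) ∧
        ReachS (succA ei eo) u w ∧ x ∈ succA ei eo w)) := by
  intro todo done racc h
  induction todo, done, racc, h using loopA.induct ei eo accl s0 with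
  | case1 done racc h _ =>
    intro hJ
    rw [loopA]
    constructor
    · exact fun hx => Or.inl hx
    · rintro (hx | ⟨hacc, u, w, (hu | hu), hr, hxw⟩)
      · exact hx
      · exact absurd hu (List.not_mem_nil)
      · have hwd : w ∈ done :=
          done_closed (succA ei eo) done
            (fun v hv s hs => ((hJ v hv s hs).1).resolve_right List.not_mem_nil) u w hr hu
        exact (hJ w hwd x hxw).2 hacc
  | case2 done racc u rest h done' st _ ih =>
    intro hJ
    rw [loopA]
    have hfst : ((succA ei eo u).foldl (astep (done ++ [u]) accl) (rest, racc)).1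
        = rest ++ (succA ei eo u).filter (fun s => decide (s ∉ done ++ [u])) :=
      foldA_fst (done ++ [u]) accl (succA ei eo u) rest racc
    have hsnd : ∀ y, (y ∈ ((succA ei eo u).foldl (astep (done ++ [u]) accl) (rest, racc)).2)
        ↔ (y ∈ racc ∨ (y ∈ succA ei eo u ∧ y ∈ accl)) :=
      fun y => foldA_snd_mem (done ++ [u]) accl (succA ei eo u) rest racc y
    rw [ih]
    · constructor
      · rintro (hx | ⟨hacc, v, w, hv, hr, hxw⟩)
        · rcases (hsnd x).mp hx with hx | ⟨hxs, hxa⟩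
          · exact Or.inl hx
          · exact Or.inr ⟨hxa, u, u, Or.inl List.mem_cons_self, Relation.ReflTransGen.refl, hxs⟩
        · rw [hfst] at hv
          rcases hv with hv | hv
          · rw [List.mem_append] at hv
            rcases hv with hv | hv
            · exact Or.inr ⟨hacc, v, w, Or.inl (List.mem_cons_of_mem _ hv), hr, hxw⟩
            · have hvs : v ∈ succA ei eo u := (List.mem_filter.mp hv).1
              exact Or.inr ⟨hacc, u, w, Or.inl List.mem_cons_self,
                Relation.ReflTransGen.trans (Relation.ReflTransGen.single hvs) hr, hxw⟩
          · rw [List.mem_append] at hv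
            rcases hv with hv | hv
            · exact Or.inr ⟨hacc, v, w, Or.inr hv, hr, hxw⟩
            · rw [List.mem_singleton] at hv; subst hv
              exact Or.inr ⟨hacc, v, w, Or.inl List.mem_cons_self, hr, hxw⟩
      · rintro (hx | ⟨hacc, v, w, hv, hr, hxw⟩)
        · exact Or.inl ((hsnd x).mpr (Or.inl hx))
        · rcases hv with hv | hv
          · rw [List.mem_cons] at hv
            rcases hv with rfl | hv
            · exact Or.inr ⟨hacc, v, w, Or.inr (List.mem_append_right _ List.mem_cons_self), hr, hxw⟩
            · exact Or.inr ⟨hacc, v, w, Or.inl (by rw [hfst]; exact List.mem_append_left _ hv), hr, hxw⟩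
          · exact Or.inr ⟨hacc, v, w, Or.inr (List.mem_append_left _ hv), hr, hxw⟩
    · -- hJ for the new state
      intro v hv s hs
      rw [List.mem_append] at hv
      rcases hv with hv | hv
      · obtain ⟨hmem, hacc⟩ := hJ v hv s hs
        refine ⟨?_, fun ha => (hsnd s).mpr (Or.inl (hacc ha))⟩
        rcases hmem with hd | ht
        · exact Or.inl (List.mem_append_left _ hd)
        · rw [List.mem_cons] at ht
          rcases ht with rfl | ht
          · exact Or.inl (List.mem_append_right _ List.mem_cons_self)
          · exact Or.inr (by rw [hfst]; exact List.mem_append_left _ ht)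
      · rw [List.mem_singleton] at hv
        refine ⟨?_, fun ha => (hsnd s).mpr (Or.inr ⟨hv ▸ hs, ha⟩)⟩
        by_cases hsd : s ∈ done ++ [u]
        · exact Or.inl hsd
        · exact Or.inr (by
            rw [hfst]
            exact List.mem_append_right _ (List.mem_filter.mpr ⟨hv ▸ hs, by simpa using hsd⟩))

lemma loopA_top_mem (ei eo accl : List Int) (s0 : Int) (x : Int) :
    x ∈ loopA ei eo accl s0 [s0] [] [] (invA_init ei eo s0) ↔
      x ∈ accl ∧ ∃ w, ReachS (succA ei eo) s0 w ∧ x ∈ succA ei eo w := by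
  rw [loopA_mem ei eo accl s0 x [s0] [] [] (invA_init ei eo s0) (fun v hv => absurd hv List.not_mem_nil)]
  constructor
  · rintro (hx | ⟨hacc, u, w, hu, hr, hxw⟩)
    · simp at hx
    · rcases hu with hu | hu
      · rw [List.mem_singleton] at hu; subst hu
        exact ⟨hacc, w, hr, hxw⟩
      · simp at hu
  · rintro ⟨hacc, w, hr, hxw⟩
    exact Or.inr ⟨hacc, s0, w, Or.inl List.mem_cons_self, hr, hxw⟩

-- path lemma for B's level BFS
lemma pathB (adj : PySem.Dict Int (List Int)) (frontier seen : List Int)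
    (hinv : ∀ v ∈ seen, v ∈ frontier ∨ ∀ s ∈ adj.getD v [], s ∈ seen)
    (hcomp : ∀ u ∈ frontier, ∀ v ∈ adj.getD u [], v ∈ (bouter adj frontier (seen, [])).1)
    (hfst : (bouter adj frontier (seen, [])).1 = seen ++ (bouter adj frontier (seen, [])).2)
    (t w : Int) (hr : ReachS (fun a => adj.getD a []) t w) (ht : t ∈ frontier) :
    (∃ t' ∈ (bouter adj frontier (seen, [])).2, ReachS (fun a => adj.getD a []) t' w) ∨
      (∀ s ∈ adj.getD w [], s ∈ (bouter adj frontier (seen, [])).1) := by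
  induction hr with
  | refl => exact Or.inr (hcomp t ht)
  | @tail w' w _ hstep ih =>
    rcases ih with ⟨t', ht', hr'⟩ | hcl
    · exact Or.inl ⟨t', ht', Relation.ReflTransGen.tail hr' hstep⟩
    · have hw : w ∈ (bouter adj frontier (seen, [])).1 := hcl w hstep
      rw [hfst, List.mem_append] at hw
      rcases hw with hw | hw
      · rcases hinv w hw with hwf | hws
        · exact Or.inr (hcomp w hwf)
        · exact Or.inr (fun s hs => by rw [hfst]; exact List.mem_append_left _ (hws s hs))
      · exact Or.inl ⟨w, hw, Relation.ReflTransGen.refl⟩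

theorem loopB_mem (adj : PySem.Dict Int (List Int)) :
    ∀ (frontier seen : List Int),
    (∀ v ∈ seen, v ∈ frontier ∨ ∀ s ∈ adj.getD v [], s ∈ seen) → ∀ x,
    (x ∈ loopB adj frontier seen ↔
      x ∈ seen ∨ ∃ t ∈ frontier, ∃ w, ReachS (fun a => adj.getD a []) t w ∧ x ∈ adj.getD w []) := by
  intro frontier seen
  induction frontier, seen using loopB.induct adj with
  | case1 seen =>
    intro _ x
    rw [loopB]
    simp
  | case2 frontier seen hne p ih =>
    intro hinv x
    rw [loopB, dif_neg hne]
    obtain ⟨c1, c2, c3⟩ := bouter_spec adj seen frontier (seen, []) (by simp) (by simp)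
    have hcomp : ∀ u ∈ frontier, ∀ v ∈ adj.getD u [], v ∈ (bouter adj frontier (seen, [])).1 := by
      intro u hu v hv
      by_cases hvs : v ∈ seen
      · rw [c1]; exact List.mem_append_left _ hvs
      · rw [c1]; exact List.mem_append_right _ ((c3 v).mpr (Or.inr ⟨u, hu, hv, hvs⟩))
    have hinv' : ∀ v ∈ (bouter adj frontier (seen, [])).1,
        v ∈ (bouter adj frontier (seen, [])).2 ∨ ∀ s ∈ adj.getD v [], s ∈ (bouter adj frontier (seen, [])).1 := by
      intro v hv
      rw [c1, List.mem_append] at hv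
      rcases hv with hv | hv
      · rcases hinv v hv with hvf | hvs
        · exact Or.inr (hcomp v hvf)
        · exact Or.inr (fun s hs => by rw [c1]; exact List.mem_append_left _ (hvs s hs))
      · exact Or.inl hv
    rw [ih hinv' x]
    constructor
    · rintro (hx | ⟨t, ht, w, hr, hxw⟩)
      · rw [c1, List.mem_append] at hx
        rcases hx with hx | hx
        · exact Or.inl hx
        · rcases (c3 x).mp hx with h0 | ⟨u, hu, hxu, _⟩
          · simp at h0
          · exact Or.inr ⟨u, hu, u, Relation.ReflTransGen.refl, hxu⟩
      · rcases (c3 t).mp ht with h0 | ⟨u, hu, htu, _⟩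
        · simp at h0
        · exact Or.inr ⟨u, hu, w,
            Relation.ReflTransGen.trans (Relation.ReflTransGen.single htu) hr, hxw⟩
    · rintro (hx | ⟨t, ht, w, hr, hxw⟩)
      · exact Or.inl (by rw [c1]; exact List.mem_append_left _ hx)
      · rcases pathB adj frontier seen hinv hcomp c1 t w hr ht with ⟨t', ht', hr'⟩ | hcl
        · exact Or.inr ⟨t', ht', w, hr', hxw⟩
        · exact Or.inl (hcl x hxw)

lemma loopB_top_mem (adj : PySem.Dict Int (List Int)) (t x : Int) :
    x ∈ loopB adj [t] [] ↔
      ∃ w, ReachS (fun a => adj.getD a []) t w ∧ x ∈ adj.getD w [] := by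
  rw [loopB_mem adj [t] [] (by intro v hv; simp at hv) x]
  simp

-- ===== the saturation closure pvReach used by Pre_ =====

lemma satStep_shape : ∀ (edges : List (Int × Int)) (S : List Int),
    ∃ t, pvSatStep edges S = S ++ t ∧ ∀ x ∈ t, x ∉ S ∧ x ∈ edges.map Prod.snd := by
  intro edges
  induction edges with
  | nil => intro S; exact ⟨[], by simp [pvSatStep], by simp⟩
  | cons p l ih =>
    intro S
    by_cases hc : p.1 ∈ S ∧ p.2 ∉ S
    · have hstep : pvSatStep (p :: l) S = pvSatStep l (S ++ [p.2]) := by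
        simp only [pvSatStep, List.foldl_cons, if_pos hc]
      obtain ⟨t, ht1, ht2⟩ := ih (S ++ [p.2])
      refine ⟨p.2 :: t, by rw [hstep, ht1]; simp, ?_⟩
      intro x hx
      rcases List.mem_cons.mp hx with rfl | hx
      · exact ⟨hc.2, by simp⟩
      · obtain ⟨h1, h2⟩ := ht2 x hx
        exact ⟨fun hxs => h1 (List.mem_append_left _ hxs),
          by rw [List.map_cons]; exact List.mem_cons_of_mem _ h2⟩
    · have hstep : pvSatStep (p :: l) S = pvSatStep l S := by
        simp only [pvSatStep, List.foldl_cons, if_neg hc]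
      obtain ⟨t, ht1, ht2⟩ := ih S
      refine ⟨t, by rw [hstep, ht1], ?_⟩
      intro x hx
      obtain ⟨h1, h2⟩ := ht2 x hx
      exact ⟨h1, by rw [List.map_cons]; exact List.mem_cons_of_mem _ h2⟩

lemma satStep_fix_closed : ∀ (edges : List (Int × Int)) (S : List Int),
    pvSatStep edges S = S → ∀ p ∈ edges, p.1 ∈ S → p.2 ∈ S := by
  intro edges
  induction edges with
  | nil => intro S _ p hp; simp at hp
  | cons q l ih =>
    intro S hfix p hp hp1
    by_cases hc : q.1 ∈ S ∧ q.2 ∉ S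
    · exfalso
      have hstep : pvSatStep (q :: l) S = pvSatStep l (S ++ [q.2]) := by
        simp only [pvSatStep, List.foldl_cons, if_pos hc]
      obtain ⟨t, ht1, _⟩ := satStep_shape l (S ++ [q.2])
      rw [hstep, ht1] at hfix
      have hlen := congrArg List.length hfix
      simp [List.length_append] at hlen
    · have hstep : pvSatStep (q :: l) S = pvSatStep l S := by
        simp only [pvSatStep, List.foldl_cons, if_neg hc]
      push_neg at hc
      rcases List.mem_cons.mp hp with rfl | hp
      · exact hc hp1
      · exact ih S (hstep ▸ hfix) p hp hp1

lemma subset_pvIter (edges : List (Int × Int)) : ∀ (n : Nat) (S : List Int), ∀ x ∈ S, x ∈ pvIter edges n S := by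
  intro n
  induction n with
  | zero => intro S x hx; exact hx
  | succ n ih =>
    intro S x hx
    rw [pvIter]
    split
    · exact hx
    · refine ih _ x ?_
      obtain ⟨t, ht1, _⟩ := satStep_shape edges S
      rw [ht1]; exact List.mem_append_left _ hx

lemma satStep_card_lt (edges : List (Int × Int)) (S : List Int)
    (hne : ¬ pvSatStep edges S = S) :
    ((edges.map Prod.snd).toFinset \ (pvSatStep edges S).toFinset).card
      < ((edges.map Prod.snd).toFinset \ S.toFinset).card := by
  obtain ⟨t, ht1, ht2⟩ := satStep_shape edges S
  have htne : t ≠ [] := by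
    rintro rfl
    exact hne (by simpa using ht1)
  obtain ⟨x, hx⟩ := List.exists_mem_of_ne_nil t htne
  obtain ⟨hxS, hxT⟩ := ht2 x hx
  have hsub : (edges.map Prod.snd).toFinset \ (pvSatStep edges S).toFinset
      ⊆ (edges.map Prod.snd).toFinset \ S.toFinset := by
    refine Finset.sdiff_subset_sdiff (Finset.Subset.refl _) ?_
    intro y hy
    rw [List.mem_toFinset] at hy ⊢
    rw [ht1]; exact List.mem_append_left _ hy
  apply Finset.card_lt_card
  rw [Finset.ssubset_iff_of_subset hsub]
  refine ⟨x, Finset.mem_sdiff.mpr ⟨List.mem_toFinset.mpr hxT, fun hc => hxS (List.mem_toFinset.mp hc)⟩, ?_⟩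
  intro hc
  have := (Finset.mem_sdiff.mp hc).2
  exact this (List.mem_toFinset.mpr (by rw [ht1]; exact List.mem_append_right _ hx))

lemma pvIter_closed (edges : List (Int × Int)) : ∀ (n : Nat) (S : List Int),
    ((edges.map Prod.snd).toFinset \ S.toFinset).card < n →
    pvSatStep edges (pvIter edges n S) = pvIter edges n S := by
  intro n
  induction n with
  | zero => intro S h; omega
  | succ n ih =>
    intro S h
    rw [pvIter]
    by_cases hfix : pvSatStep edges S = S
    · rw [if_pos hfix]; exact hfix
    · rw [if_neg hfix]
      refine ih _ ?_
      have := satStep_card_lt edges S hfix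
      omega

lemma pvReach_closed (edges : List (Int × Int)) (S : List Int) :
    ∀ p ∈ edges, p.1 ∈ pvReach edges S → p.2 ∈ pvReach edges S := by
  have hcard : ((edges.map Prod.snd).toFinset \ S.toFinset).card
      < (edges.map Prod.snd).toFinset.card + 1 := by
    have := Finset.card_le_card (Finset.sdiff_subset
      (s := (edges.map Prod.snd).toFinset) (t := S.toFinset))
    omega
  exact satStep_fix_closed edges _ (pvIter_closed edges _ S hcard)

lemma adjB_pair (ei eo : List Int) (a b : Int) :
    b ∈ (adjB ei eo).getD a [] ↔ (a, b) ∈ ei.zip eo := by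
  have hB : (adjB ei eo).getD a [] = ((ei.zip eo).filter (fun p => p.1 == a)).map (·.2) := by
    rw [adjB, PySem.Dict.getD_foldl_modify_append]
    simp
  rw [hB]
  simp only [List.mem_map, List.mem_filter]
  constructor
  · rintro ⟨⟨p1, p2⟩, ⟨hp, hpa⟩, hb⟩
    have h1 : p1 = a := by simpa using hpa
    subst h1
    cases hb
    exact hp
  · intro h
    exact ⟨(a, b), ⟨h, by simp⟩, rfl⟩

lemma reach_in_pvReach (ei eo : List Int) (start b : Int)
    (h : ReachS (fun v => (adjB ei eo).getD v []) start b) :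
    b ∈ pvReach (ei.zip eo) [start] := by
  induction h with
  | refl => exact subset_pvIter (ei.zip eo) _ [start] start (by simp)
  | tail _ hstep ih =>
    exact pvReach_closed (ei.zip eo) [start] _ ((adjB_pair ei eo _ _).mp hstep) ih

-- ===== good states: the two successor maps agree at any state all of whose edge_in
-- occurrences are at in-range indices =====

lemma good_idx (ei eo : List Int) (u : Int) (hg : u ∉ ei.drop eo.length)
    (k : Nat) (hk : k < ei.length) (he : ei[k] = u) : k < eo.length := by
  by_contra hk2
  push_neg at hk2
  apply hg
  have hlt : k - eo.length < (ei.drop eo.length).length := by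
    rw [List.length_drop]; omega
  refine List.mem_iff_getElem.mpr ⟨k - eo.length, hlt, ?_⟩
  rw [List.getElem_drop]
  rw [← he]
  congr 1
  omega

lemma succA_good (ei eo : List Int) (u : Int) (hg : u ∉ ei.drop eo.length) (x : Int) :
    x ∈ succA ei eo u ↔ x ∈ (adjB ei eo).getD u [] := by
  have hB : (adjB ei eo).getD u [] = ((ei.zip eo).filter (fun p => p.1 == u)).map (·.2) := by
    rw [adjB, PySem.Dict.getD_foldl_modify_append]
    simp
  rw [hB]
  simp only [succA, PySem.List.mem_dedup, List.mem_filterMap, List.mem_map, List.mem_filter]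
  constructor
  · rintro ⟨p, hp, hf⟩
    by_cases hpu : p.2 = u
    · rw [if_pos hpu, Option.some.injEq] at hf
      rcases (PySem.List.mem_enumerate_iff ei 0 p).mp hp with ⟨k, hk, rfl⟩
      have hke : ei[k] = u := by simpa using hpu
      have hklt : k < eo.length := good_idx ei eo u hg k hk hke
      refine ⟨(ei[k], eo[k]), ⟨?_, ?_⟩, ?_⟩
      · rw [List.mem_iff_getElem]
        exact ⟨k, by rw [List.length_zip]; omega, by rw [List.getElem_zip]⟩
      · simpa using hpu
      · rw [← hf]
        have hidx : ((0 + (k:Int), ei[k]).1.toNat) = k := by simp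
        rw [hidx, List.getD_eq_getElem eo 0 hklt]
    · rw [if_neg hpu] at hf; exact absurd hf (by simp)
  · rintro ⟨p, ⟨hp, hpu⟩, hx⟩
    rw [List.mem_iff_getElem] at hp
    obtain ⟨k, hk, hpk⟩ := hp
    rw [List.length_zip] at hk
    have hkei : k < ei.length := by omega
    refine ⟨((k : Int), ei[k]), ?_, ?_⟩
    · rw [PySem.List.mem_enumerate_iff ei 0]
      exact ⟨k, hkei, by simp⟩
    · have hp1 : p.1 = ei[k] := by rw [← hpk, List.getElem_zip]
      have hp2 : p.2 = eo[k] := by rw [← hpk, List.getElem_zip]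
      have hbu : ei[k] = u := by
        have := hpu
        rw [hp1] at this
        simpa using this
      rw [if_pos hbu, Option.some.injEq]
      rw [← hx, hp2]
      simp only [Int.toNat_natCast]
      rw [List.getD_eq_getElem eo 0 (by omega)]

lemma reachT_of_reachA (ei eo : List Int) (a : Int)
    (hg : ∀ u, ReachS (fun v => (adjB ei eo).getD v []) a u → u ∉ ei.drop eo.length) :
    ∀ b, ReachS (succA ei eo) a b → ReachS (fun v => (adjB ei eo).getD v []) a b := by
  intro b h
  induction h with
  | refl => exact Relation.ReflTransGen.refl
  | @tail w b _ hstep ih =>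
    exact Relation.ReflTransGen.tail ih ((succA_good ei eo w (hg w ih) b).mp hstep)

lemma reachA_of_reachT (ei eo : List Int) (a : Int)
    (hg : ∀ u, ReachS (fun v => (adjB ei eo).getD v []) a u → u ∉ ei.drop eo.length) :
    ∀ b, ReachS (fun v => (adjB ei eo).getD v []) a b → ReachS (succA ei eo) a b := by
  intro b h
  induction h with
  | refl => exact Relation.ReflTransGen.refl
  | @tail w b hpre hstep ih =>
    exact Relation.ReflTransGen.tail ih ((succA_good ei eo w (hg w hpre) b).mpr hstep)

-- ===== A's for-loop over reachable_acc =====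

lemma necFor_true_eq (fuel : Nat) (ei eo : List Int) (start : Int) :
    ∀ racc, necFor fuel ei eo start racc true =
      if ∃ s ∈ racc, (necAux fuel ei eo [s] s "from_acc").1 = true then (true, "non_empty")
      else (false, "no_acc_selfreached") := by
  intro racc
  induction racc with
  | nil => rw [necFor]; simp
  | cons s rest ih =>
    rw [necFor]
    by_cases hs : (necAux fuel ei eo [s] s "from_acc").1 = true
    · rw [if_pos hs]
      rw [if_pos (show ∃ t ∈ s :: rest, (necAux fuel ei eo [t] t "from_acc").1 = true from
        ⟨s, List.mem_cons_self, hs⟩)]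
    · rw [if_neg hs]
      rw [ih]
      by_cases hrest : ∃ s' ∈ rest, (necAux fuel ei eo [s'] s' "from_acc").1 = true
      · rw [if_pos hrest]
        obtain ⟨s', h1, h2⟩ := hrest
        rw [if_pos (show ∃ t ∈ s :: rest, (necAux fuel ei eo [t] t "from_acc").1 = true from
          ⟨s', List.mem_cons_of_mem _ h1, h2⟩)]
      · rw [if_neg hrest]
        rw [if_neg (show ¬∃ t ∈ s :: rest, (necAux fuel ei eo [t] t "from_acc").1 = true from by
          rintro ⟨t, ht, h2⟩
          rw [List.mem_cons] at ht
          rcases ht with rfl | ht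
          · exact hs h2
          · exact hrest ⟨t, ht, h2⟩)]

lemma necFor_eq (fuel : Nat) (ei eo : List Int) (start : Int) (racc : List Int) :
    necFor fuel ei eo start racc false =
      if ∃ s ∈ racc, (necAux fuel ei eo [s] s "from_acc").1 = true then (true, "non_empty")
      else if racc = [] then (false, "no_acc_reached") else (false, "no_acc_selfreached") := by
  cases racc with
  | nil => rw [necFor]; simp
  | cons s rest =>
    rw [necFor]
    by_cases hs : (necAux fuel ei eo [s] s "from_acc").1 = true
    · rw [if_pos hs]
      rw [if_pos (show ∃ t ∈ s :: rest, (necAux fuel ei eo [t] t "from_acc").1 = true from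
        ⟨s, List.mem_cons_self, hs⟩)]
    · rw [if_neg hs]
      rw [necFor_true_eq]
      by_cases hrest : ∃ s' ∈ rest, (necAux fuel ei eo [s'] s' "from_acc").1 = true
      · rw [if_pos hrest]
        obtain ⟨s', h1, h2⟩ := hrest
        rw [if_pos (show ∃ t ∈ s :: rest, (necAux fuel ei eo [t] t "from_acc").1 = true from
          ⟨s', List.mem_cons_of_mem _ h1, h2⟩)]
      · rw [if_neg hrest]
        rw [if_neg (show ¬∃ t ∈ s :: rest, (necAux fuel ei eo [t] t "from_acc").1 = true from by
          rintro ⟨t, ht, h2⟩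
          rw [List.mem_cons] at ht
          rcases ht with rfl | ht
          · exact hs h2
          · exact hrest ⟨t, ht, h2⟩)]
        rw [if_neg (show ¬(s :: rest = []) from by simp)]

lemma necAux_succ (fuel : Nat) (ei eo accl : List Int) (start : Int) (mode : String) :
    necAux (fuel+1) ei eo accl start mode =
      if accl.length = 0 then (false, "no_acc_state")
      else
        if mode = "from_acc" ∧ 0 < (loopA ei eo accl start [start] [] [] (invA_init ei eo start)).length
        then (true, "non_empty")
        else necFor fuel ei eo start (loopA ei eo accl start [start] [] [] (invA_init ei eo start)) false := by
  rw [necAux]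

-- the recursive call: non-emptiness from s with acc = [s]
lemma inner_true (ei eo : List Int) (s : Int)
    (hr : ∃ w, ReachS (succA ei eo) s w ∧ s ∈ succA ei eo w) :
    necAux 1 ei eo [s] s "from_acc" = (true, "non_empty") := by
  rw [show (1:Nat) = 0+1 from rfl, necAux_succ]
  rw [if_neg (by simp)]
  have hmem : s ∈ loopA ei eo [s] s [s] [] [] (invA_init ei eo s) :=
    (loopA_top_mem ei eo [s] s s).mpr ⟨List.mem_cons_self, hr⟩
  rw [if_pos ⟨rfl, List.length_pos_iff.mpr (List.ne_nil_of_mem hmem)⟩]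

lemma inner_false (ei eo : List Int) (s : Int)
    (hr : ¬ ∃ w, ReachS (succA ei eo) s w ∧ s ∈ succA ei eo w) :
    necAux 1 ei eo [s] s "from_acc" = (false, "no_acc_reached") := by
  rw [show (1:Nat) = 0+1 from rfl, necAux_succ]
  rw [if_neg (by simp)]
  have hnil : loopA ei eo [s] s [s] [] [] (invA_init ei eo s) = [] := by
    rw [List.eq_nil_iff_forall_not_mem]
    intro x hx
    obtain ⟨hxs, hw⟩ := (loopA_top_mem ei eo [s] s x).mp hx
    rw [List.mem_singleton] at hxs
    subst hxs
    exact hr hw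
  rw [hnil]
  rw [if_neg (by simp)]
  rw [necFor]
  simp

lemma inner_iff (ei eo : List Int) (s : Int) :
    (necAux 1 ei eo [s] s "from_acc").1 = true ↔
      ∃ w, ReachS (succA ei eo) s w ∧ s ∈ succA ei eo w := by
  by_cases hr : ∃ w, ReachS (succA ei eo) s w ∧ s ∈ succA ei eo w
  · rw [inner_true ei eo s hr]; simpa using hr
  · rw [inner_false ei eo s hr]; simpa using hr

theorem pvWitness_ok :
    Dom_non_emptyness_check (pvWitness_non_emptyness_check.1) (pvWitness_non_emptyness_check.2.1) (pvWitness_non_emptyness_check.2.2.1) (pvWitness_non_emptyness_check.2.2.2.1) (pvWitness_non_emptyness_check.2.2.2.2) ∧ Pre_non_emptyness_check (pvWitness_non_emptyness_check.1) (pvWitness_non_emptyness_check.2.1) (pvWitness_non_emptyness_check.2.2.1) (pvWitness_non_emptyness_check.2.2.2.1) (pvWitness_non_emptyness_check.2.2.2.2) := by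
  constructor <;> decide

-- ===== VERDICT (by name: the statement is the Claim_ definition above) =====
theorem non_emptyness_check_spec : Claim_equal_non_emptyness_check := by
  intro ei eo acc start mode _hdom hpre
  unfold Spec_non_emptyness_check
  unfold non_emptyness_check
  rw [show (2:Nat) = 1+1 from rfl, necAux_succ]
  simp only [non_emptyness_check_alt]
  by_cases hacc : acc.length = 0
  · rw [if_pos hacc, if_pos hacc]
  · rw [if_neg hacc, if_neg hacc]
    -- Pre_ gives: every state reachable from start in the truncated graph is "good"
    have hgood : ∀ u, ReachS (fun v => (adjB ei eo).getD v []) start u → u ∉ ei.drop eo.length := by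
      intro u hu hub
      rcases hpre with hpre | hpre
      · exact hacc (by rw [hpre]; rfl)
      · exact hpre u hub (reach_in_pvReach ei eo start u hu)
    have hreach : ∀ b, ReachS (succA ei eo) start b ↔ ReachS (fun v => (adjB ei eo).getD v []) start b :=
      fun b => ⟨reachT_of_reachA ei eo start hgood b, reachA_of_reachT ei eo start hgood b⟩
    have hsucc : ∀ w x, ReachS (fun v => (adjB ei eo).getD v []) start w →
        (x ∈ succA ei eo w ↔ x ∈ (adjB ei eo).getD w []) :=
      fun w x hw => succA_good ei eo w (hgood w hw) x
    have hmemA : ∀ x, x ∈ loopA ei eo acc start [start] [] [] (invA_init ei eo start) ↔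
        x ∈ acc ∧ ∃ w, ReachS (succA ei eo) start w ∧ x ∈ succA ei eo w :=
      fun x => loopA_top_mem ei eo acc start x
    have hmemB : ∀ x, x ∈ (loopB (adjB ei eo) [start] []).filter
          (fun s => PySem.Set.contains (PySem.Set.ofList acc) s) ↔
        (∃ w, ReachS (fun a => (adjB ei eo).getD a []) start w ∧ x ∈ (adjB ei eo).getD w []) ∧ x ∈ acc := by
      intro x
      rw [List.mem_filter, loopB_top_mem]
      constructor
      · rintro ⟨h1, h2⟩
        exact ⟨h1, by simpa [pysem] using h2⟩
      · rintro ⟨h1, h2⟩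
        exact ⟨h1, by simpa [pysem] using h2⟩
    have hAB : ∀ x, x ∈ loopA ei eo acc start [start] [] [] (invA_init ei eo start) ↔
        x ∈ (loopB (adjB ei eo) [start] []).filter
          (fun s => PySem.Set.contains (PySem.Set.ofList acc) s) := by
      intro x
      rw [hmemA, hmemB]
      constructor
      · rintro ⟨h1, w, h2, h3⟩
        have h2' := (hreach w).mp h2
        exact ⟨⟨w, h2', (hsucc w x h2').mp h3⟩, h1⟩
      · rintro ⟨⟨w, h2, h3⟩, h1⟩
        exact ⟨h1, w, (hreach w).mpr h2, (hsucc w x h2).mpr h3⟩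
    have hnil : (loopA ei eo acc start [start] [] [] (invA_init ei eo start) = []) ↔
        ((loopB (adjB ei eo) [start] []).filter
          (fun s => PySem.Set.contains (PySem.Set.ofList acc) s) = []) := by
      rw [List.eq_nil_iff_forall_not_mem, List.eq_nil_iff_forall_not_mem]
      exact ⟨fun h x hx => h x ((hAB x).mpr hx), fun h x hx => h x ((hAB x).mp hx)⟩
    -- each element of reachable_acc is itself reachable from start, and everything
    -- reachable from it is still good
    have hs_reach : ∀ s, s ∈ (loopB (adjB ei eo) [start] []).filter
          (fun t => PySem.Set.contains (PySem.Set.ofList acc) t) →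
        ReachS (fun v => (adjB ei eo).getD v []) start s := by
      intro s hs
      obtain ⟨⟨w, hw, hsw⟩, _⟩ := (hmemB s).mp hs
      exact Relation.ReflTransGen.tail hw hsw
    have hgood_s : ∀ s, ReachS (fun v => (adjB ei eo).getD v []) start s →
        ∀ u, ReachS (fun v => (adjB ei eo).getD v []) s u → u ∉ ei.drop eo.length :=
      fun s hs u hu => hgood u (Relation.ReflTransGen.trans hs hu)
    have hinner : ∀ s, ReachS (fun v => (adjB ei eo).getD v []) start s →
        ((necAux 1 ei eo [s] s "from_acc").1 = true ↔
          (loopB (adjB ei eo) [s] []).contains s) := by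
      intro s hs
      rw [inner_iff, List.contains_iff_mem, loopB_top_mem]
      constructor
      · rintro ⟨w, hw, hsw⟩
        have hw' := reachT_of_reachA ei eo s (hgood_s s hs) w hw
        exact ⟨w, hw', (succA_good ei eo w (hgood_s s hs w hw') s).mp hsw⟩
      · rintro ⟨w, hw, hsw⟩
        exact ⟨w, reachA_of_reachT ei eo s (hgood_s s hs) w hw,
          (succA_good ei eo w (hgood_s s hs w hw) s).mpr hsw⟩
    by_cases hmode : mode = "from_acc" ∧
        0 < (loopA ei eo acc start [start] [] [] (invA_init ei eo start)).length
    · rw [if_pos hmode, if_pos ⟨hmode.1,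
        fun hB => (List.ne_nil_of_length_pos hmode.2) (hnil.mpr hB)⟩]
    · rw [if_neg hmode, if_neg (by
        rintro ⟨h1, h2⟩
        exact hmode ⟨h1, List.length_pos_iff.mpr ((not_iff_not.mpr hnil).mpr h2)⟩)]
      rw [necFor_eq]
      by_cases hempty : loopA ei eo acc start [start] [] [] (invA_init ei eo start) = []
      · rw [if_neg (by rintro ⟨s, hs, _⟩; rw [hempty] at hs; exact absurd hs List.not_mem_nil)]
        rw [if_pos hempty, if_pos (hnil.mp hempty)]
      · rw [if_neg (hnil.not.mp hempty)]
        by_cases hcyc : ∃ s ∈ loopA ei eo acc start [start] [] [] (invA_init ei eo start),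
            (necAux 1 ei eo [s] s "from_acc").1 = true
        · rw [if_pos hcyc]
          obtain ⟨s, hs, hcs⟩ := hcyc
          have hsB := (hAB s).mp hs
          have hany : ((loopB (adjB ei eo) [start] []).filter
              (fun s => PySem.Set.contains (PySem.Set.ofList acc) s)).any
                (fun s => (loopB (adjB ei eo) [s] []).contains s) = true := by
            rw [List.any_eq_true]
            exact ⟨s, hsB, (hinner s (hs_reach s hsB)).mp hcs⟩
          rw [if_pos hany]
        · rw [if_neg hcyc]
          have hany : ¬ ((loopB (adjB ei eo) [start] []).filter
              (fun s => PySem.Set.contains (PySem.Set.ofList acc) s)).any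
                (fun s => (loopB (adjB ei eo) [s] []).contains s) = true := by
            rw [List.any_eq_true]
            rintro ⟨s, hs, hcs⟩
            exact hcyc ⟨s, (hAB s).mpr hs, (hinner s (hs_reach s hs)).mpr hcs⟩
          rw [if_neg hany, if_neg hempty]
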